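-- pv_equiv track=rewrite | github.com/attoums/projet-schoolHTML | python/projets/main.py/main.py/td3.py | pairs_impairs
-- ===== SOURCE A (Python) =====
-- def pairs_impairs(liste_entier):
--         pairs = []
--         impairs = []
--         for n in range(len(liste_entier)):
--                 if n %2 == 0:
--                         pairs.append(n)
--                 else:
--                         impairs.append(n)
--         return pairs , impairs
-- ===== SOURCE B (Python) =====
-- def pairs_impairs(liste_entier):
--     pairs = list(range(0, len(liste_entier), 2))
--     impairs = list(range(1, len(liste_entier), 2))
--     return pairs, impairs
-- ===== Notes on version B (the rewrite author's own statement) =====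
-- stated objective: idiomatic
-- what changed: Replaces the per-index loop with a modulo branch and two accumulating appends by two closed-form strided range constructions over the length.
import Mathlib
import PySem

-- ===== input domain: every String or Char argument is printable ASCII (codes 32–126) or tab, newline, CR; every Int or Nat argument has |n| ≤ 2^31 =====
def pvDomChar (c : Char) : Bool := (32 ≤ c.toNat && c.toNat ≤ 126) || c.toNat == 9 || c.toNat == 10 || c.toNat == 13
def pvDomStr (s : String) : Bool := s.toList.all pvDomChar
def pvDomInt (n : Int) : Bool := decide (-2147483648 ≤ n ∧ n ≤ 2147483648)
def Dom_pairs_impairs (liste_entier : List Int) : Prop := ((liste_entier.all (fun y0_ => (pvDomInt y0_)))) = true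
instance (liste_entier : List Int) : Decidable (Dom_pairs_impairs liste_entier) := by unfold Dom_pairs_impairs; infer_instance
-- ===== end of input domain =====

-- B replaces A's per-index modulo-branch loop by two closed-form strided ranges (idiomatic; same O(n) cost).

-- ===== PORT A =====
-- for n in range(len(liste_entier)): if n % 2 == 0: pairs.append(n) else: impairs.append(n)
def pairs_impairs (liste_entier : List Int) : List Int × List Int :=
  (PySem.List.pyRange 0 (PySem.List.len liste_entier) 1).foldl
    (fun acc n => if PySem.Int.mod n 2 = 0 then (acc.1 ++ [n], acc.2) else (acc.1, acc.2 ++ [n]))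
    (([] : List Int), ([] : List Int))

-- ===== PORT B =====
-- pairs = list(range(0, len, 2)); impairs = list(range(1, len, 2))
def pairs_impairs_alt (liste_entier : List Int) : List Int × List Int :=
  (PySem.List.pyRange 0 (PySem.List.len liste_entier) 2,
   PySem.List.pyRange 1 (PySem.List.len liste_entier) 2)

-- ===== PRECONDITION & SPEC =====
def Spec_pairs_impairs (liste_entier : List Int) (out : List Int × List Int) : Prop := out = pairs_impairs_alt liste_entier
instance (liste_entier : List Int) (out : List Int × List Int) : Decidable (Spec_pairs_impairs liste_entier out) := by unfold Spec_pairs_impairs; infer_instance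

-- ===== CLAIM (what is proved, stated in full; the proofs are below) =====
def Claim_equal_pairs_impairs : Prop := ∀ (liste_entier : List Int), Dom_pairs_impairs liste_entier → Spec_pairs_impairs liste_entier (pairs_impairs liste_entier)

-- ===== LEMMAS AND PROOFS =====

-- closed forms of the two step-2 ranges
theorem pyRange_two_zero (n : Nat) :
    PySem.List.pyRange 0 (n : Int) 2 = (List.range ((n + 1) / 2)).map (fun k : Nat => 2 * (k : Int)) := by
  rw [PySem.List.pyRange_of_pos 0 (n : Int) (by norm_num)]
  have hc : (if (0 : Int) < (n : Int) then (((n : Int) - 0 + 2 - 1) / 2).toNat else 0) = (n + 1) / 2 := by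
    split_ifs with h <;> omega
  rw [hc]
  simp

theorem pyRange_two_one (n : Nat) :
    PySem.List.pyRange 1 (n : Int) 2 = (List.range (n / 2)).map (fun k : Nat => 1 + 2 * (k : Int)) := by
  rw [PySem.List.pyRange_of_pos 1 (n : Int) (by norm_num)]
  have hc : (if (1 : Int) < (n : Int) then (((n : Int) - 1 + 2 - 1) / 2).toNat else 0) = n / 2 := by
    split_ifs with h <;> omega
  rw [hc]

-- loop invariant: A's fold over 0..n-1 produces exactly the two strided ranges
theorem fold_eq_ranges (n : Nat) :
    (PySem.List.pyRange 0 (n : Int) 1).foldl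
      (fun acc m => if PySem.Int.mod m 2 = 0 then (acc.1 ++ [m], acc.2) else (acc.1, acc.2 ++ [m]))
      (([] : List Int), ([] : List Int))
    = (PySem.List.pyRange 0 (n : Int) 2, PySem.List.pyRange 1 (n : Int) 2) := by
  induction n with
  | zero => decide
  | succ n ih =>
    have hle : (0 : Int) ≤ (n : Int) := by positivity
    have hcast : ((n + 1 : Nat) : Int) = (n : Int) + 1 := by push_cast; ring
    rw [hcast, PySem.List.pyRange_one_succ_right hle, List.foldl_append, ih]
    rw [pyRange_two_zero n, pyRange_two_one n]
    have h0 : PySem.List.pyRange 0 ((n : Int) + 1) 2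
        = (List.range ((n + 1 + 1) / 2)).map (fun k : Nat => 2 * (k : Int)) := by
      rw [← hcast, pyRange_two_zero (n + 1)]
    have h1 : PySem.List.pyRange 1 ((n : Int) + 1) 2
        = (List.range ((n + 1) / 2)).map (fun k : Nat => 1 + 2 * (k : Int)) := by
      rw [← hcast, pyRange_two_one (n + 1)]
    rw [h0, h1]
    simp only [List.foldl_cons, List.foldl_nil]
    have hmod : PySem.Int.mod (n : Int) 2 = ((n % 2 : Nat) : Int) := PySem.Int.mod_natCast n 2
    by_cases hpar : n % 2 = 0
    · rw [if_pos (by rw [hmod, hpar]; rfl)]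
      have ha : (n + 1 + 1) / 2 = (n + 1) / 2 + 1 := by omega
      have hb : (n + 1) / 2 = n / 2 := by omega
      rw [ha, hb, List.range_succ, List.map_append]
      simp
      omega
    · rw [if_neg (by rw [hmod]; intro h; apply hpar; exact_mod_cast h)]
      have ha : (n + 1 + 1) / 2 = (n + 1) / 2 := by omega
      have hb : (n + 1) / 2 = n / 2 + 1 := by omega
      rw [ha, hb, List.range_succ, List.map_append]
      simp
      omega

-- ===== VERDICT (by name: the statement is the Claim_ definition above) =====
theorem pairs_impairs_spec : Claim_equal_pairs_impairs := by
  intro l _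
  unfold Spec_pairs_impairs pairs_impairs pairs_impairs_alt
  have h := fold_eq_ranges l.length
  simpa [PySem.List.len] using h
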